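-- pv_equiv track=rewrite | github.com/vialab/Textension | static/py/textension.py | fadeColor
-- ===== SOURCE A (Python) =====
-- def fadeColor(c, d=1, n=100):
--     """ Return a list of colors reducing in opacity """
--     color_list = []
--     a = 0
--     s = int(round(255.0 / n))
--     if d < 0:
--         s = s * -1
--         a = 255
--     for i in range(n):
--         a=a+s
--         if a < 0:
--             a = 0
--         if a > 255:
--             a = 255
--         color_list.append((c[0],c[1],c[2],a))
--     return color_list
-- ===== SOURCE B (Python) =====
-- def fadeColor(c, d=1, n=100):
--     """ Return a list of colors reducing in opacity """
--     s = int(round(255.0 / n))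
--     if d < 0:
--         s = -s
--         a0 = 255
--     else:
--         a0 = 0
--     return [(c[0], c[1], c[2], max(0, min(255, a0 + (i + 1) * s))) for i in range(n)]
-- ===== Notes on version B (the rewrite author's own statement) =====
-- stated objective: simpler
-- what changed: Replaced the stateful running accumulator with per-step clamping by a single comprehension computing each alpha in closed form max(0, min(255, a0 + (i+1)*s)), valid because the constant-sign step makes the accumulation monotonic so stepwise clamping equals a final clamp.
import Mathlib
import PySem

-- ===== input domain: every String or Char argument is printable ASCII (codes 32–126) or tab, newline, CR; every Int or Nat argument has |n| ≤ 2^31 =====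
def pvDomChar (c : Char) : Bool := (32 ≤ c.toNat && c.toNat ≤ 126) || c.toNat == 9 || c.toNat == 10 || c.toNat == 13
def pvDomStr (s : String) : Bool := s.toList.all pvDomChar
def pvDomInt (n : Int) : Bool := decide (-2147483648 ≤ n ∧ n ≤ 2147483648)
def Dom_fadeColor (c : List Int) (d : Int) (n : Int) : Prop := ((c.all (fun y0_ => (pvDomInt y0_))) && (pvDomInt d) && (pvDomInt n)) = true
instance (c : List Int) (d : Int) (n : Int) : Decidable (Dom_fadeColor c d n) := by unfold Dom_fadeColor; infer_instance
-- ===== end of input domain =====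

-- B replaces A's running accumulator with a single comprehension computing each alpha
-- in closed form (objective: simpler).

-- Shared helper: int(round(255.0 / n)) for n ≠ 0. Exact on Dom: for integer n with
-- |n| ≤ 2^31 the double 255.0/n is within 2⁻⁴⁵ of 255/n while 255/n is never within
-- 2⁻³² of a half-integer unless exactly equal to one (then the double is exact), so
-- Python's round-half-to-even of the double equals exact half-to-even rounding of 255/n.
def pyRound255div (n : Int) : Int :=
  let p : Int := if n < 0 then -255 else 255
  let q : Int := if n < 0 then -n else n
  let r := PySem.Int.floordiv p q
  let t := 2 * (p - r * q)
  if t < q then r else if q < t then r + 1 else if r % 2 = 0 then r else r + 1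

-- ===== PORT A =====
-- the for-loop of A: n iterations, accumulator a, appends (c0,c1,c2,clamped a)
def fadeLoopA (c0 c1 c2 s : Int) : Nat → Int → List (Int × Int × Int × Int)
  | 0, _ => []
  | m + 1, a =>
    let a1 := a + s
    let a2 := if a1 < 0 then 0 else a1
    let a3 := if a2 > 255 then 255 else a2
    (c0, c1, c2, a3) :: fadeLoopA c0 c1 c2 s m a3

def fadeColor (c : List Int) (d : Int) (n : Int) : List (Int × Int × Int × Int) :=
  let a : Int := 0
  let s := pyRound255div n
  let s := if d < 0 then s * (-1) else s
  let a := if d < 0 then 255 else a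
  -- c[0], c[1], c[2]: in range under Pre_ (getD 0 is only reached outside Pre_)
  fadeLoopA ((PySem.List.pyGet? c 0).getD 0) ((PySem.List.pyGet? c 1).getD 0)
    ((PySem.List.pyGet? c 2).getD 0) s n.toNat a

-- ===== PORT B =====
def fadeColor_alt (c : List Int) (d : Int) (n : Int) : List (Int × Int × Int × Int) :=
  let s := pyRound255div n
  let s := if d < 0 then -s else s
  let a0 : Int := if d < 0 then 255 else 0
  (List.range n.toNat).map (fun (i : Nat) =>
    ((PySem.List.pyGet? c 0).getD 0, (PySem.List.pyGet? c 1).getD 0,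
     (PySem.List.pyGet? c 2).getD 0, max 0 (min 255 (a0 + ((i : Int) + 1) * s))))

-- ===== PRECONDITION & SPEC =====
-- Pre_ excludes exactly where A raises: n = 0 (ZeroDivisionError) and n > 0 with
-- fewer than 3 color components (IndexError); for n < 0 the loop never runs.
def Pre_fadeColor (c : List Int) (d : Int) (n : Int) : Prop := n ≠ 0 ∧ (0 < n → 3 ≤ c.length)
instance (c : List Int) (d : Int) (n : Int) : Decidable (Pre_fadeColor c d n) := by
  unfold Pre_fadeColor; infer_instance
def pvWitness_fadeColor : List Int × Int × Int := ([10, 20, 30], 1, 4)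

def Spec_fadeColor (c : List Int) (d : Int) (n : Int) (out : List (Int × Int × Int × Int)) : Prop := out = fadeColor_alt c d n
instance (c : List Int) (d : Int) (n : Int) (out : List (Int × Int × Int × Int)) : Decidable (Spec_fadeColor c d n out) := by unfold Spec_fadeColor; infer_instance

-- ===== CLAIM (what is proved, stated in full; the proofs are below) =====
def Claim_equal_fadeColor : Prop := ∀ (c : List Int) (d : Int) (n : Int), Dom_fadeColor c d n → Pre_fadeColor c d n → Spec_fadeColor c d n (fadeColor c d n)

-- ===== LEMMAS AND PROOFS =====

lemma pyRound255div_nonneg (n : Int) (hn : 0 < n) : 0 ≤ pyRound255div n := by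
  unfold pyRound255div
  have h1 : ¬ n < 0 := by omega
  simp only [h1, if_false]
  have hr : 0 ≤ PySem.Int.floordiv 255 n := by
    rw [PySem.Int.floordiv_eq_ediv_of_pos hn]; exact Int.ediv_nonneg (by norm_num) (by omega)
  split_ifs <;> omega

-- upward case: step t ≥ 0, starting from clamp x with 0 ≤ x
lemma loop_up (c0 c1 c2 t : Int) (ht : 0 ≤ t) :
    ∀ (m : Nat) (x : Int), 0 ≤ x →
      fadeLoopA c0 c1 c2 t m (max 0 (min 255 x)) =
        (List.range m).map (fun (i : Nat) => (c0, c1, c2, max 0 (min 255 (x + ((i : Int) + 1) * t)))) := by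
  intro m
  induction m with
  | zero => intro x _; simp [fadeLoopA]
  | succ m ih =>
    intro x hx
    have hstep : (let a1 := max 0 (min 255 x) + t;
        let a2 := if a1 < 0 then 0 else a1;
        if a2 > 255 then 255 else a2) = max 0 (min 255 (x + t)) := by
      simp only []; split_ifs <;> omega
    show (c0, c1, c2, _) :: fadeLoopA c0 c1 c2 t m _ = _
    rw [hstep, List.range_succ_eq_map, List.map_cons, ih (x + t) (by omega), List.map_map]
    refine congrArg₂ _ (by norm_num) (List.map_congr_left ?_)
    intro i _
    simp only [Function.comp]
    congr 3
    push_cast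
    ring

-- downward case: step t ≤ 0, starting from clamp x with x ≤ 255
lemma loop_down (c0 c1 c2 t : Int) (ht : t ≤ 0) :
    ∀ (m : Nat) (x : Int), x ≤ 255 →
      fadeLoopA c0 c1 c2 t m (max 0 (min 255 x)) =
        (List.range m).map (fun (i : Nat) => (c0, c1, c2, max 0 (min 255 (x + ((i : Int) + 1) * t)))) := by
  intro m
  induction m with
  | zero => intro x _; simp [fadeLoopA]
  | succ m ih =>
    intro x hx
    have hstep : (let a1 := max 0 (min 255 x) + t;
        let a2 := if a1 < 0 then 0 else a1;
        if a2 > 255 then 255 else a2) = max 0 (min 255 (x + t)) := by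
      simp only []; split_ifs <;> omega
    show (c0, c1, c2, _) :: fadeLoopA c0 c1 c2 t m _ = _
    rw [hstep, List.range_succ_eq_map, List.map_cons, ih (x + t) (by omega), List.map_map]
    refine congrArg₂ _ (by norm_num) (List.map_congr_left ?_)
    intro i _
    simp only [Function.comp]
    congr 3
    push_cast
    ring

-- ===== VERDICT (by name: the statement is the Claim_ definition above) =====
theorem fadeColor_spec : Claim_equal_fadeColor := by
  intro c d n _ hpre
  unfold Spec_fadeColor fadeColor fadeColor_alt
  rcases hpre with ⟨hn0, _⟩
  by_cases hneg : n < 0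
  · have : n.toNat = 0 := by omega
    simp [this, fadeLoopA]
  · have hn : 0 < n := by omega
    have hs : 0 ≤ pyRound255div n := pyRound255div_nonneg n hn
    by_cases hd : d < 0
    · simp only [hd, if_true]
      have h255 : (255 : Int) = max 0 (min 255 255) := by norm_num
      rw [mul_neg_one]
      calc fadeLoopA _ _ _ (-(pyRound255div n)) n.toNat 255
          = fadeLoopA _ _ _ (-(pyRound255div n)) n.toNat (max 0 (min 255 255)) := by rw [← h255]
        _ = _ := loop_down _ _ _ _ (by omega) n.toNat 255 (by norm_num)
    · simp only [hd, if_false]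
      have h0 : (0 : Int) = max 0 (min 255 0) := by norm_num
      calc fadeLoopA _ _ _ (pyRound255div n) n.toNat 0
          = fadeLoopA _ _ _ (pyRound255div n) n.toNat (max 0 (min 255 0)) := by rw [← h0]
        _ = _ := loop_up _ _ _ _ hs n.toNat 0 (by norm_num)
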